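-- pv_equiv track=rewrite | github.com/Nidjnidj/DecisionMate3_Revision4 | decisionmate_core/dependencies.py | downstream_of
-- ===== SOURCE A (Python) =====
-- from typing import Dict, List, Set
--
-- DAG: Dict[str, List[str]] = {
--     "wells":        ["subsurface"],
--     "engineering":  ["subsurface", "wells"],
--     "schedule":     ["engineering", "wells", "procurement:milestones?"],  # soft link example
--     "procurement":  ["engineering", "schedule"],
--     "construction": ["procurement", "schedule"],
--     "cost":         ["engineering", "schedule", "risk"],
--     "economics":    ["subsurface", "cost", "opex_profile"],
--     "risk":         ["subsurface","wells","engineering","procurement","construction","schedule","cost"],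
-- }
--
-- def downstream_of(discipline: str) -> Set[str]:
--     """Return all disciplines that (transitively) depend on `discipline`."""
--     rev: Dict[str, List[str]] = {}
--     for node, parents in DAG.items():
--         for p in parents:
--             key = p.split(":")[0]  # ignore soft qualifiers
--             rev.setdefault(key, []).append(node)
--     out: Set[str] = set()
--     def dfs(x: str):
--         for child in rev.get(x, []):
--             if child not in out:
--                 out.add(child)
--                 dfs(child)
--     dfs(discipline)
--     return out
-- ===== SOURCE B (Python) =====
-- from typing import Dict, List, Set
--
-- DAG: Dict[str, List[str]] = {
--     "wells":        ["subsurface"],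
--     "engineering":  ["subsurface", "wells"],
--     "schedule":     ["engineering", "wells", "procurement:milestones?"],
--     "procurement":  ["engineering", "schedule"],
--     "construction": ["procurement", "schedule"],
--     "cost":         ["engineering", "schedule", "risk"],
--     "economics":    ["subsurface", "cost", "opex_profile"],
--     "risk":         ["subsurface","wells","engineering","procurement","construction","schedule","cost"],
-- }
--
-- def downstream_of(discipline: str) -> Set[str]:
--     """Return all disciplines that (transitively) depend on `discipline`.
--
--     Fixpoint iteration over the forward graph: no reverse adjacency, no
--     recursion -- repeat full passes adding any node with a dependency on
--     `discipline` or on an already-collected node, until nothing changes."""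
--     out: Set[str] = set()
--     changed = True
--     while changed:
--         changed = False
--         for node, parents in DAG.items():
--             if node not in out and any(
--                 p.split(":")[0] == discipline or p.split(":")[0] in out
--                 for p in parents
--             ):
--                 out.add(node)
--                 changed = True
--     return out
-- ===== Notes on version B (the rewrite author's own statement) =====
-- stated objective: alternative
-- what changed: Replaces A's reverse-adjacency construction plus recursive DFS with a recursion-free fixpoint iteration: repeated full passes over the forward DAG adding any node whose (soft-link-normalized) parent is the discipline or already collected, until a pass adds nothing.
import Mathlib
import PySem

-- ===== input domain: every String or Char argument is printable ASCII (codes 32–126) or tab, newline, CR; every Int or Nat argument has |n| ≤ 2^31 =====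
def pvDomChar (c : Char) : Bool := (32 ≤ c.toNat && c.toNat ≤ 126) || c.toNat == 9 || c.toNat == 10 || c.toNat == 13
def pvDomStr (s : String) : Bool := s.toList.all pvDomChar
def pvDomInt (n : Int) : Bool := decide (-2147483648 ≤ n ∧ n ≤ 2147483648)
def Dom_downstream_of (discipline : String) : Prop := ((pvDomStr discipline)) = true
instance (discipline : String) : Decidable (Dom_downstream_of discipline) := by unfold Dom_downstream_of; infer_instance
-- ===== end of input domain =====

-- B replaces A's reverse-adjacency construction + recursive DFS by a fixpoint
-- iteration of full passes over the forward DAG (objective: alternative).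
-- Both Pythons return an unordered set; each port returns the set's elements as
-- the canonical sorted list (exact as a set; a Python set's hash iteration order
-- is not modelled, so the list representation order is canonicalized).

-- the module-level DAG constant (shared context of both programs)
def pvDAG : List (String × List String) :=
  [("wells",        ["subsurface"]),
   ("engineering",  ["subsurface", "wells"]),
   ("schedule",     ["engineering", "wells", "procurement:milestones?"]),
   ("procurement",  ["engineering", "schedule"]),
   ("construction", ["procurement", "schedule"]),
   ("cost",         ["engineering", "schedule", "risk"]),
   ("economics",    ["subsurface", "cost", "opex_profile"]),
   ("risk",         ["subsurface","wells","engineering","procurement","construction","schedule","cost"])]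

-- ===== PORT A =====
-- p.split(":")[0]: ":" is a nonempty separator so split? is always `some` of a
-- nonempty list; the getD/headD defaults are unreachable, the port is exact
def pvKeyA (p : String) : String := ((PySem.Str.split? p ":").getD []).headD ""

-- rev.setdefault(key, []).append(node)  =  rev[key] = rev.get(key, []) + [node]
def pvRevA : PySem.Dict String (List String) :=
  pvDAG.foldl
    (fun rev np => np.2.foldl (fun rev p => rev.modify (pvKeyA p) [] (· ++ [np.1])) rev)
    PySem.Dict.empty

-- the recursive dfs; fuel 16 exceeds the maximal recursion depth (≤ 9: every
-- recursive call follows an insertion into out, and out holds at most 8 nodes)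
def pvDfsA (fuel : Nat) (x : String) (out : PySem.Set String) : PySem.Set String :=
  match fuel with
  | 0 => out
  | f + 1 =>
    (pvRevA.getD x []).foldl
      (fun out child =>
        if PySem.Set.contains out child then out
        else pvDfsA f child (PySem.Set.add out child))
      out

def downstream_of (discipline : String) : List String :=
  PySem.List.sorted (pvDfsA 16 discipline PySem.Set.empty) (fun x => x.toList) false

-- ===== PORT B =====
def pvKeyB (p : String) : String := ((PySem.Str.split? p ":").getD []).headD ""

-- one full pass of the for-loop over DAG.items(); returns (out, changed)
def pvPassB (d : String) (out : PySem.Set String) : PySem.Set String × Bool :=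
  pvDAG.foldl
    (fun st np =>
      if !(PySem.Set.contains st.1 np.1) &&
         np.2.any (fun p => pvKeyB p == d || PySem.Set.contains st.1 (pvKeyB p))
      then (PySem.Set.add st.1 np.1, true)
      else st)
    (out, false)

-- the while-changed loop; fuel 9 exceeds the number of passes (every pass but
-- the last adds at least one of the 8 nodes to out)
def pvLoopB (d : String) : Nat → PySem.Set String → PySem.Set String
  | 0, out => out
  | f + 1, out =>
    let st := pvPassB d out
    if st.2 then pvLoopB d f st.1 else st.1

def downstream_of_alt (discipline : String) : List String :=
  PySem.List.sorted (pvLoopB discipline 9 PySem.Set.empty) (fun x => x.toList) false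

-- ===== PRECONDITION & SPEC =====
def Spec_downstream_of (discipline : String) (out : List String) : Prop := out = downstream_of_alt discipline
instance (discipline : String) (out : List String) : Decidable (Spec_downstream_of discipline out) := by unfold Spec_downstream_of; infer_instance

-- ===== CLAIM (what is proved, stated in full; the proofs are below) =====
def Claim_equal_downstream_of : Prop := ∀ (discipline : String), Dom_downstream_of discipline → Spec_downstream_of discipline (downstream_of discipline)

-- ===== LEMMAS AND PROOFS =====

-- the only disciplines that occur (normalized) as a parent in the DAG
def pvKeys : List String :=
  ["subsurface", "wells", "engineering", "procurement", "schedule",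
   "risk", "cost", "construction", "opex_profile"]

-- the reverse adjacency A builds, written out as a literal dict
theorem pvRevA_eq : pvRevA = PySem.Dict.mk
    [("subsurface", ["wells","engineering","economics","risk"]),
     ("wells", ["engineering","schedule","risk"]),
     ("engineering", ["schedule","procurement","cost","risk"]),
     ("procurement", ["schedule","construction","risk"]),
     ("schedule", ["procurement","construction","cost","risk"]),
     ("risk", ["cost"]),
     ("cost", ["economics","risk"]),
     ("opex_profile", ["economics"]),
     ("construction", ["risk"])] := by decide

theorem pvRevA_getD_unknown (d : String)
    (h1 : d ≠ "subsurface") (h2 : d ≠ "wells") (h3 : d ≠ "engineering")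
    (h4 : d ≠ "procurement") (h5 : d ≠ "schedule") (h6 : d ≠ "risk")
    (h7 : d ≠ "cost") (h8 : d ≠ "construction") (h9 : d ≠ "opex_profile") :
    pvRevA.getD d [] = [] := by
  rw [pvRevA_eq]
  simp [PySem.Dict.getD,
    beq_eq_false_iff_ne.mpr (Ne.symm h1), beq_eq_false_iff_ne.mpr (Ne.symm h2),
    beq_eq_false_iff_ne.mpr (Ne.symm h3), beq_eq_false_iff_ne.mpr (Ne.symm h4),
    beq_eq_false_iff_ne.mpr (Ne.symm h5), beq_eq_false_iff_ne.mpr (Ne.symm h6),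
    beq_eq_false_iff_ne.mpr (Ne.symm h7), beq_eq_false_iff_ne.mpr (Ne.symm h8),
    beq_eq_false_iff_ne.mpr (Ne.symm h9), PySem.Dict.get?]

-- A on an unknown discipline: no reverse edges, the dfs adds nothing
theorem pvA_unknown (d : String) (h : d ∉ pvKeys) : downstream_of d = [] := by
  simp only [pvKeys, List.mem_cons, List.not_mem_nil, or_false, not_or] at h
  obtain ⟨h1, h2, h3, h4, h5, h6, h7, h8, h9⟩ := h
  have h0 : pvDfsA 16 d PySem.Set.empty = PySem.Set.empty := by
    rw [show (16 : Nat) = 15 + 1 from rfl]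
    simp only [pvDfsA, pvRevA_getD_unknown d h1 h2 h3 h4 h5 h6 h7 h8 h9, List.foldl_nil]
  unfold downstream_of
  rw [h0]
  decide

-- B on an unknown discipline: the first pass changes nothing …
theorem pvPassB_unknown (d : String)
    (h1 : d ≠ "subsurface") (h2 : d ≠ "wells") (h3 : d ≠ "engineering")
    (h4 : d ≠ "procurement") (h5 : d ≠ "schedule") (h6 : d ≠ "risk")
    (h7 : d ≠ "cost") (h8 : d ≠ "construction") (h9 : d ≠ "opex_profile") :
    pvPassB d PySem.Set.empty = (PySem.Set.empty, false) := by
  have e1 : pvKeyB "subsurface" = "subsurface" := by decide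
  have e2 : pvKeyB "wells" = "wells" := by decide
  have e3 : pvKeyB "engineering" = "engineering" := by decide
  have e4 : pvKeyB "procurement:milestones?" = "procurement" := by decide
  have e5 : pvKeyB "schedule" = "schedule" := by decide
  have e6 : pvKeyB "risk" = "risk" := by decide
  have e7 : pvKeyB "procurement" = "procurement" := by decide
  have e8 : pvKeyB "construction" = "construction" := by decide
  have e9 : pvKeyB "cost" = "cost" := by decide
  have e10 : pvKeyB "opex_profile" = "opex_profile" := by decide
  simp [pvPassB, pvDAG, e1, e2, e3, e4, e5, e6, e7, e8, e9, e10,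
    PySem.Set.contains, PySem.Set.empty,
    Ne.symm h1, Ne.symm h2, Ne.symm h3, Ne.symm h4, Ne.symm h5,
    Ne.symm h6, Ne.symm h7, Ne.symm h8, Ne.symm h9]

-- … so the while-loop stops immediately with the empty set
theorem pvB_unknown (d : String) (h : d ∉ pvKeys) : downstream_of_alt d = [] := by
  simp only [pvKeys, List.mem_cons, List.not_mem_nil, or_false, not_or] at h
  obtain ⟨h1, h2, h3, h4, h5, h6, h7, h8, h9⟩ := h
  have h0 : pvLoopB d 9 PySem.Set.empty = PySem.Set.empty := by
    rw [show (9 : Nat) = 8 + 1 from rfl]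
    simp only [pvLoopB, pvPassB_unknown d h1 h2 h3 h4 h5 h6 h7 h8 h9]
    simp
  unfold downstream_of_alt
  rw [h0]
  decide

-- ===== VERDICT (by name: the statement is the Claim_ definition above) =====
set_option maxHeartbeats 2000000 in
theorem downstream_of_spec : Claim_equal_downstream_of := by
  intro d _
  unfold Spec_downstream_of
  by_cases h : d ∈ pvKeys
  · simp only [pvKeys, List.mem_cons, List.not_mem_nil, or_false] at h
    rcases h with rfl | rfl | rfl | rfl | rfl | rfl | rfl | rfl | rfl <;> decide
  · rw [pvA_unknown d h, pvB_unknown d h]
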